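-- pv_equiv track=rewrite | github.com/ishandutta2007/challenges | codegolf/transform-a-matrix.py | transform
-- ===== SOURCE A (Python) =====
-- def at(m, r, c, i, j):
--     if i < 0 or j < 0 or i >= r or j >= c or m[i][j] < 0:
--         return 0
--     return m[i][j]
--
-- def transform(m):
--     if len(m) == 0 or len(m[0]) == 0:
--         return
--
--     p = []
--     r = len(m)
--     c = len(m[0])
--     for i in range(r):
--         q = []
--         for j in range(c):
--             v = at(m, r, c, i-1, j)
--             v += at(m, r, c, i+1, j)
--             v += at(m, r, c, i, j-1)
--             v += at(m, r, c, i, j+1)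
--             q.append(v)
--         p.append(q)
--     return p
-- ===== SOURCE B (Python) =====
-- def transform(m):
--     if len(m) == 0 or len(m[0]) == 0:
--         return None
--     r = len(m)
--     c = len(m[0])
--     p = [[0] * c for _ in range(r)]
--     for i in range(r):
--         for j in range(c):
--             v = m[i][j]
--             if v >= 0:
--                 if i > 0:
--                     p[i - 1][j] += v
--                 if i + 1 < r:
--                     p[i + 1][j] += v
--                 if j > 0:
--                     p[i][j - 1] += v
--                 if j + 1 < c:
--                     p[i][j + 1] += v
--     return p
-- ===== Notes on version B (the rewrite author's own statement) =====
-- stated objective: alternative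
-- what changed: Replaces the per-cell gather (each output cell sums its four guarded neighbors via the at() helper) with a scatter: a zero grid is built once and each non-negative cell adds its value to its in-range neighbors in place.
import Mathlib
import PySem

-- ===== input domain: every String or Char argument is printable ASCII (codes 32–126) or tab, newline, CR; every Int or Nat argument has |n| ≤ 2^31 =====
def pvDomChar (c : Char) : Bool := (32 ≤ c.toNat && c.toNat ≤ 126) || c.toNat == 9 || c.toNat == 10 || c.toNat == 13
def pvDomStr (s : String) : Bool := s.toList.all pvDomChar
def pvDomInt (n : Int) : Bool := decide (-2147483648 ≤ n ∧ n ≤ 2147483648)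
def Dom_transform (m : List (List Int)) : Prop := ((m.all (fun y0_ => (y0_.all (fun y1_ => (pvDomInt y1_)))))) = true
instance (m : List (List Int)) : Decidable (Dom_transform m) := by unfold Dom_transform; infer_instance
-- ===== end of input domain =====

-- B re-implements A by scattering each non-negative cell's value onto its in-range neighbors of a zero
-- grid, instead of gathering the four guarded neighbor reads per output cell (alternative decomposition).

-- m[i][j] for 0 ≤ i < len(m), 0 ≤ j: exact under Pre_transform (reads stay inside the rows there;
-- on ragged rows Python raises IndexError, which Pre_transform excludes)
def pk (m : List (List Int)) (i j : Nat) : Int := (m.getD i []).getD j 0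

-- ===== PORT A =====
-- at(m, r, c, i, j); the .toNat calls sit under the guard ¬(i < 0 ∨ j < 0), so they are exact
def atA (m : List (List Int)) (r c i j : Int) : Int :=
  if i < 0 ∨ j < 0 ∨ r ≤ i ∨ c ≤ j then 0
  else if pk m i.toNat j.toNat < 0 then 0 else pk m i.toNat j.toNat

-- the Python locals r = len(m), c = len(m[0]) are inlined as m.length and (m.headD []).length
def transform (m : List (List Int)) : Option (List (List Int)) :=
  if m.length = 0 ∨ (m.headD []).length = 0 then none
  else
    some ((List.range m.length).foldl (fun p (i : Nat) =>
      p ++ [(List.range (m.headD []).length).foldl (fun q (j : Nat) =>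
        q ++ [atA m (m.length : Int) ((m.headD []).length : Int) ((i : Int) - 1) (j : Int) +
              atA m (m.length : Int) ((m.headD []).length : Int) ((i : Int) + 1) (j : Int) +
              atA m (m.length : Int) ((m.headD []).length : Int) (i : Int) ((j : Int) - 1) +
              atA m (m.length : Int) ((m.headD []).length : Int) (i : Int) ((j : Int) + 1)]) []]) [])

-- ===== PORT B =====
-- p[x][y] += v
def bump (p : List (List Int)) (x y : Nat) (v : Int) : List (List Int) :=
  p.mapIdx fun i row => if i = x then row.mapIdx (fun j w => if j = y then w + v else w) else row

-- body of B's inner loop: if v >= 0, add v = m[i][j] to the in-range neighbors of (i, j)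
def scatterB (r c : Nat) (p : List (List Int)) (i j : Nat) (v : Int) : List (List Int) :=
  if 0 ≤ v then
    let p1 := if 0 < i then bump p (i - 1) j v else p
    let p2 := if i + 1 < r then bump p1 (i + 1) j v else p1
    let p3 := if 0 < j then bump p2 i (j - 1) v else p2
    if j + 1 < c then bump p3 i (j + 1) v else p3
  else p

def transform_alt (m : List (List Int)) : Option (List (List Int)) :=
  if m.length = 0 ∨ (m.headD []).length = 0 then none
  else
    some ((List.range m.length).foldl
      (fun p i => (List.range (m.headD []).length).foldl
        (fun q j => scatterB m.length (m.headD []).length q i j (pk m i j)) p)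
      ((List.range m.length).map fun _ => (List.range (m.headD []).length).map fun _ => (0 : Int)))

-- ===== PRECONDITION & SPEC =====
-- Pre_ excludes exactly the ragged matrices (some row shorter than the first row): there Python A
-- raises IndexError inside at() (and Python B raises on the same out-of-range reads).
def Pre_transform (m : List (List Int)) : Prop :=
  ∀ row ∈ m, (m.headD []).length ≤ row.length
instance (m : List (List Int)) : Decidable (Pre_transform m) := by unfold Pre_transform; infer_instance

def pvWitness_transform : List (List Int) := [[1, -2, 3], [4, 5, -6]]

def Spec_transform (m : List (List Int)) (out : Option (List (List Int))) : Prop := out = transform_alt m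
instance (m : List (List Int)) (out : Option (List (List Int))) : Decidable (Spec_transform m out) := by unfold Spec_transform; infer_instance

-- ===== CLAIM (what is proved, stated in full; the proofs are below) =====
def Claim_equal_transform : Prop := ∀ (m : List (List Int)), Dom_transform m → Pre_transform m → Spec_transform m (transform m)

-- ===== LEMMAS AND PROOFS =====

-- shape invariant of B's accumulator grid
def Dims (p : List (List Int)) (r c : Nat) : Prop := p.length = r ∧ ∀ row ∈ p, row.length = c

-- A's value of the output cell (i, j)
def cellA (m : List (List Int)) (r c : Int) (i j : Nat) : Int :=
  atA m r c ((i : Int) - 1) j + atA m r c ((i : Int) + 1) j +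
  atA m r c i ((j : Int) - 1) + atA m r c i ((j : Int) + 1)

-- B's total contribution of source cell (i, j) to output cell (a, b)
def contC (m : List (List Int)) (r c i j a b : Nat) : Int :=
  (if 0 ≤ pk m i j ∧ 0 < i ∧ a = i - 1 ∧ b = j then pk m i j else 0) +
  (if 0 ≤ pk m i j ∧ i + 1 < r ∧ a = i + 1 ∧ b = j then pk m i j else 0) +
  (if 0 ≤ pk m i j ∧ 0 < j ∧ a = i ∧ b = j - 1 then pk m i j else 0) +
  (if 0 ≤ pk m i j ∧ j + 1 < c ∧ a = i ∧ b = j + 1 then pk m i j else 0)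

theorem Dims_bump (p : List (List Int)) (r c x y : Nat) (v : Int) (hD : Dims p r c) :
    Dims (bump p x y v) r c := by
  obtain ⟨h1, h2⟩ := hD
  refine ⟨by simp [bump, h1], ?_⟩
  intro row hrow
  simp only [bump, List.mem_iff_getElem] at hrow
  obtain ⟨i, hi, hrow⟩ := hrow
  simp only [List.getElem_mapIdx] at hrow
  have hmem : p[i]'(by simpa using hi) ∈ p := List.getElem_mem _
  have := h2 _ hmem
  subst hrow
  split <;> simp [this]

theorem pk_bump (p : List (List Int)) (r c x y a b : Nat) (v : Int)
    (hD : Dims p r c) (hx : x < r) (hy : y < c) :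
    pk (bump p x y v) a b = pk p a b + (if a = x ∧ b = y then v else 0) := by
  obtain ⟨h1, h2⟩ := hD
  by_cases hab : a < p.length
  · have hga : (bump p x y v).getD a [] = if a = x then (p[a]'hab).mapIdx (fun j w => if j = y then w + v else w) else p[a]'hab := by
      simp [bump, List.getD, List.getElem?_mapIdx, List.getElem?_eq_getElem hab]
    have hpa : p.getD a [] = p[a]'hab := by simp [List.getD, List.getElem?_eq_getElem hab]
    have hrowlen : (p[a]'hab).length = c := h2 _ (List.getElem_mem _)
    rw [pk, pk, hga, hpa]
    by_cases hax : a = x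
    · simp only [hax, if_true]
      by_cases hbb : b < (p[x]'(hax ▸ hab)).length
      · subst hax
        simp only [List.getD, List.getElem?_mapIdx, List.getElem?_eq_getElem hbb, Option.map_some, Option.getD_some]
        split <;> simp_all
      · subst hax
        have hb' : ¬ b = y := by omega
        simp [List.getD, List.getElem?_eq_none_iff.mpr (by omega : (p[a]'hab).length ≤ b), hb']
    · simp [hax]
  · have : ¬ (a = x ∧ b = y) := by omega
    rw [pk, pk]
    simp [List.getD, List.getElem?_eq_none_iff.mpr (by omega : p.length ≤ a),
      List.getElem?_eq_none_iff.mpr (by simp [bump]; omega : (bump p x y v).length ≤ a), this]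

theorem condbump (p : List (List Int)) (r c x y a b : Nat) (v : Int) (G : Prop) [Decidable G]
    (hD : Dims p r c) (hx : G → x < r) (hy : G → y < c) :
    Dims (if G then bump p x y v else p) r c ∧
      pk (if G then bump p x y v else p) a b = pk p a b + (if G ∧ a = x ∧ b = y then v else 0) := by
  by_cases hG : G
  · simp only [hG, if_true, true_and]
    exact ⟨Dims_bump _ _ _ _ _ _ hD, pk_bump p r c x y a b v hD (hx hG) (hy hG)⟩
  · simp only [hG, if_false, false_and]
    exact ⟨hD, by simp⟩

theorem scatterB_step (m p : List (List Int)) (r c i j a b : Nat)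
    (hD : Dims p r c) (hi : i < r) (hj : j < c) :
    Dims (scatterB r c p i j (pk m i j)) r c ∧
      pk (scatterB r c p i j (pk m i j)) a b = pk p a b + contC m r c i j a b := by
  unfold scatterB
  by_cases h0 : 0 ≤ pk m i j
  · simp only [h0, if_true]
    obtain ⟨hD1, he1⟩ := condbump p r c (i - 1) j a b (pk m i j) (0 < i) hD (fun _ => by omega) (fun _ => hj)
    obtain ⟨hD2, he2⟩ := condbump _ r c (i + 1) j a b (pk m i j) (i + 1 < r) hD1 (fun h => h) (fun _ => hj)
    obtain ⟨hD3, he3⟩ := condbump _ r c i (j - 1) a b (pk m i j) (0 < j) hD2 (fun _ => hi) (fun _ => by omega)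
    obtain ⟨hD4, he4⟩ := condbump _ r c i (j + 1) a b (pk m i j) (j + 1 < c) hD3 (fun _ => hi) (fun h => h)
    refine ⟨hD4, ?_⟩
    rw [he4, he3, he2, he1]
    simp only [contC, h0, true_and]
    ring
  · simp [h0, hD, contC]

theorem fold_pk {α : Type} (r c a b : Nat) (L : List α)
    (f : List (List Int) → α → List (List Int)) (g : α → Int)
    (H : ∀ q x, x ∈ L → Dims q r c → Dims (f q x) r c ∧ pk (f q x) a b = pk q a b + g x) :
    ∀ p, Dims p r c → Dims (L.foldl f p) r c ∧
      pk (L.foldl f p) a b = pk p a b + (L.map g).sum := by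
  induction L with
  | nil => intro p hD; simpa using hD
  | cons x L ih =>
    intro p hD
    obtain ⟨hD1, he1⟩ := H p x (by simp) hD
    obtain ⟨hD2, he2⟩ := ih (fun q z hz hq => H q z (by simp [hz]) hq) (f p x) hD1
    refine ⟨hD2, ?_⟩
    rw [List.foldl_cons] at *
    rw [he2, he1]
    simp
    ring

theorem sum_map_range_int (n : Nat) (f : Nat → Int) :
    ((List.range n).map f).sum = ∑ i ∈ Finset.range n, f i := by
  induction n with
  | zero => simp
  | succ k ih => rw [List.range_succ, Finset.sum_range_succ]; simp [ih]

theorem sum_spike (r c i0 j0 : Nat) (v : Int) (P : Prop) [Decidable P] :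
    (∑ i ∈ Finset.range r, ∑ j ∈ Finset.range c, if i = i0 ∧ j = j0 ∧ P then v else 0)
      = if i0 < r ∧ j0 < c ∧ P then v else 0 := by
  by_cases hP : P
  · simp only [hP, and_true]
    have hin : ∀ i, (∑ j ∈ Finset.range c, if i = i0 ∧ j = j0 then v else 0)
        = if i = i0 then (if j0 < c then v else 0) else 0 := by
      intro i
      by_cases hi : i = i0
      · subst hi; simp [Finset.sum_ite_eq', Finset.mem_range]
      · simp [hi]
    rw [Finset.sum_congr rfl (fun i _ => hin i)]
    by_cases hj : j0 < c
    · simp [Finset.sum_ite_eq', Finset.mem_range, hj]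
    · simp [hj]
  · simp [hP]

theorem cont_sum (m : List (List Int)) (r c a b : Nat) (ha : a < r) (hb : b < c) :
    (∑ i ∈ Finset.range r, ∑ j ∈ Finset.range c, contC m r c i j a b)
      = cellA m (r : Int) (c : Int) a b := by
  have e1eq : ∀ i j : Nat, (if 0 ≤ pk m i j ∧ 0 < i ∧ a = i - 1 ∧ b = j then pk m i j else 0)
      = (if i = a + 1 ∧ j = b ∧ 0 ≤ pk m (a + 1) b then pk m (a + 1) b else 0) := by
    intro i j
    by_cases h : i = a + 1 ∧ j = b
    · obtain ⟨h1, h2⟩ := h; subst h1; subst h2; split_ifs <;> omega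
    · split_ifs <;> omega
  have e2eq : ∀ i j : Nat, (if 0 ≤ pk m i j ∧ i + 1 < r ∧ a = i + 1 ∧ b = j then pk m i j else 0)
      = (if i = a - 1 ∧ j = b ∧ (1 ≤ a ∧ 0 ≤ pk m (a - 1) b) then pk m (a - 1) b else 0) := by
    intro i j
    by_cases h : i = a - 1 ∧ j = b
    · obtain ⟨h1, h2⟩ := h; subst h1; subst h2; split_ifs <;> omega
    · split_ifs <;> omega
  have e3eq : ∀ i j : Nat, (if 0 ≤ pk m i j ∧ 0 < j ∧ a = i ∧ b = j - 1 then pk m i j else 0)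
      = (if i = a ∧ j = b + 1 ∧ 0 ≤ pk m a (b + 1) then pk m a (b + 1) else 0) := by
    intro i j
    by_cases h : i = a ∧ j = b + 1
    · obtain ⟨h1, h2⟩ := h; subst h1; subst h2; split_ifs <;> omega
    · split_ifs <;> omega
  have e4eq : ∀ i j : Nat, (if 0 ≤ pk m i j ∧ j + 1 < c ∧ a = i ∧ b = j + 1 then pk m i j else 0)
      = (if i = a ∧ j = b - 1 ∧ (1 ≤ b ∧ 0 ≤ pk m a (b - 1)) then pk m a (b - 1) else 0) := by
    intro i j
    by_cases h : i = a ∧ j = b - 1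
    · obtain ⟨h1, h2⟩ := h; subst h1; subst h2; split_ifs <;> omega
    · split_ifs <;> omega
  have hpt : ∀ i j : Nat, contC m r c i j a b =
      (if i = a + 1 ∧ j = b ∧ 0 ≤ pk m (a + 1) b then pk m (a + 1) b else 0) +
      (if i = a - 1 ∧ j = b ∧ (1 ≤ a ∧ 0 ≤ pk m (a - 1) b) then pk m (a - 1) b else 0) +
      (if i = a ∧ j = b + 1 ∧ 0 ≤ pk m a (b + 1) then pk m a (b + 1) else 0) +
      (if i = a ∧ j = b - 1 ∧ (1 ≤ b ∧ 0 ≤ pk m a (b - 1)) then pk m a (b - 1) else 0) := by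
    intro i j
    rw [contC, e1eq, e2eq, e3eq, e4eq]
  have hA1 : atA m r c ((a : Int) + 1) b
      = (if a + 1 < r ∧ b < c ∧ 0 ≤ pk m (a + 1) b then pk m (a + 1) b else 0) := by
    have ht : ((a : Int) + 1).toNat = a + 1 := by omega
    have hb' : ((b : Int)).toNat = b := by omega
    rw [atA, ht, hb']
    split_ifs <;> omega
  have hA2 : atA m r c ((a : Int) - 1) b
      = (if a - 1 < r ∧ b < c ∧ (1 ≤ a ∧ 0 ≤ pk m (a - 1) b) then pk m (a - 1) b else 0) := by
    by_cases haz : a = 0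
    · subst haz; rw [atA]; split_ifs <;> omega
    · have ht : ((a : Int) - 1).toNat = a - 1 := by omega
      have hb' : ((b : Int)).toNat = b := by omega
      rw [atA, ht, hb']
      split_ifs <;> omega
  have hA3 : atA m r c (a : Int) ((b : Int) + 1)
      = (if a < r ∧ b + 1 < c ∧ 0 ≤ pk m a (b + 1) then pk m a (b + 1) else 0) := by
    have ht : ((b : Int) + 1).toNat = b + 1 := by omega
    have ha' : ((a : Int)).toNat = a := by omega
    rw [atA, ht, ha']
    split_ifs <;> omega
  have hA4 : atA m r c (a : Int) ((b : Int) - 1)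
      = (if a < r ∧ b - 1 < c ∧ (1 ≤ b ∧ 0 ≤ pk m a (b - 1)) then pk m a (b - 1) else 0) := by
    by_cases hbz : b = 0
    · subst hbz; rw [atA]; split_ifs <;> omega
    · have ht : ((b : Int) - 1).toNat = b - 1 := by omega
      have ha' : ((a : Int)).toNat = a := by omega
      rw [atA, ht, ha']
      split_ifs <;> omega
  rw [Finset.sum_congr rfl fun i _ => Finset.sum_congr rfl fun j _ => hpt i j]
  simp only [Finset.sum_add_distrib]
  rw [sum_spike, sum_spike, sum_spike, sum_spike]
  rw [cellA, hA1, hA2, hA3, hA4]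
  ring

theorem pk_zero_grid (r c a b : Nat) :
    pk ((List.range r).map fun _ => (List.range c).map fun _ => (0 : Int)) a b = 0 := by
  simp only [pk, List.getD, List.map_const', List.length_range, List.getElem?_replicate]
  split_ifs <;> simp

theorem Dims_zero_grid (r c : Nat) :
    Dims ((List.range r).map fun _ => (List.range c).map fun _ => (0 : Int)) r c := by
  constructor
  · simp
  · intro row hrow
    simp only [List.mem_map] at hrow
    obtain ⟨_, _, rfl⟩ := hrow
    simp

theorem final_grid (m : List (List Int)) (r c : Nat) (hr : r = m.length) (hc : c = (m.headD []).length) :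
    ((List.range r).foldl
      (fun p i => (List.range c).foldl (fun q j => scatterB r c q i j (pk m i j)) p)
      ((List.range r).map fun _ => (List.range c).map fun _ => (0 : Int)))
    = (List.range r).map fun a => (List.range c).map fun b => cellA m (r : Int) (c : Int) a b := by
  set p0 := (List.range r).map fun _ => (List.range c).map fun _ => (0 : Int) with hp0
  set fin := (List.range r).foldl
      (fun p i => (List.range c).foldl (fun q j => scatterB r c q i j (pk m i j)) p) p0 with hfin
  have key : ∀ a b : Nat, Dims fin r c ∧
      pk fin a b = pk p0 a b + ((List.range r).map fun i =>
        ((List.range c).map fun j => contC m r c i j a b).sum).sum := by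
    intro a b
    refine fold_pk r c a b _ _ _ ?_ p0 (Dims_zero_grid r c)
    intro q i hi hq
    have hir : i < r := by simpa using List.mem_range.mp hi
    exact fold_pk r c a b _ _ _
      (fun q' j hj hq' => scatterB_step m q' r c i j a b hq' hir (by simpa using List.mem_range.mp hj)) q hq
  have hD : Dims fin r c := (key 0 0).1
  have hpk : ∀ a b : Nat, a < r → b < c → pk fin a b = cellA m (r : Int) (c : Int) a b := by
    intro a b ha hb
    rw [(key a b).2, pk_zero_grid]
    rw [sum_map_range_int r, Finset.sum_congr rfl fun i _ => sum_map_range_int c _]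
    rw [cont_sum m r c a b ha hb]
    ring
  apply List.ext_getElem
  · simp [hD.1]
  · intro n h1 h2
    have hn : n < r := by simpa [hD.1] using h1
    have hrow : fin[n] ∈ fin := List.getElem_mem _
    have hlen : (fin[n]'h1).length = c := hD.2 _ hrow
    simp only [List.getElem_map, List.getElem_range]
    apply List.ext_getElem
    · simpa using hlen
    · intro k k1 k2
      have hk : k < c := by omega
      have := hpk n k hn hk
      rw [pk, List.getD_eq_getElem _ _ (by omega : n < fin.length),
        List.getD_eq_getElem _ _ (by omega : k < (fin[n]'h1).length)] at this
      simp only [List.getElem_map, List.getElem_range]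
      exact this

theorem transform_eq_alt (m : List (List Int)) : transform m = transform_alt m := by
  rw [transform, transform_alt]
  by_cases hemp : m.length = 0 ∨ (m.headD []).length = 0
  · rw [if_pos hemp, if_pos hemp]
  · rw [if_neg hemp, if_neg hemp]
    congr 1
    rw [final_grid m m.length (m.headD []).length rfl rfl]
    simp only [PySem.List.foldl_append_singleton_eq_map, List.nil_append]
    rfl

-- ===== VERDICT (by name: the statement is the Claim_ definition above) =====
theorem transform_spec : Claim_equal_transform := by
  unfold Claim_equal_transform
  intro m _ _
  exact transform_eq_alt m
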